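-- pv_equiv track=rewrite | github.com/yockey88/OtherEngine | tools/other/core/legacy.py | parse_legacy_args
-- ===== SOURCE A (Python) =====
-- def is_build_cmnd(cmnd):
--     build_cmnds = ["buildsln", "run"]
--     for x in build_cmnds:
--         if x == cmnd:
--             return True
--     return False
--
-- def parse_legacy_args(argv):
--     argc = len(argv)
--     i = 0
--
--     cmd_list = []
--     while i < argc:
--         cmds = [argv[i]]
--         while True:
--             if i < argc - 1 and not is_build_cmnd(argv[i + 1]):
--                 cmds.append(argv[i + 1])
--                 i = i + 1
--             else:
--                 break
--         cmd_list.append(cmds)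
--         i = i + 1
--
--     return cmd_list
-- ===== SOURCE B (Python) =====
-- def parse_legacy_args(argv):
--     result = []
--     for idx, x in enumerate(argv):
--         if idx == 0 or x in ("buildsln", "run"):
--             result.append([x])
--         else:
--             result[-1].append(x)
--     return result
-- ===== Notes on version B (the rewrite author's own statement) =====
-- stated objective: simpler
-- what changed: Replaced the nested while loops with explicit index bookkeeping by a single enumerate pass that starts a new group at index 0 or at a build command and otherwise appends to the last group.
import Mathlib
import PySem

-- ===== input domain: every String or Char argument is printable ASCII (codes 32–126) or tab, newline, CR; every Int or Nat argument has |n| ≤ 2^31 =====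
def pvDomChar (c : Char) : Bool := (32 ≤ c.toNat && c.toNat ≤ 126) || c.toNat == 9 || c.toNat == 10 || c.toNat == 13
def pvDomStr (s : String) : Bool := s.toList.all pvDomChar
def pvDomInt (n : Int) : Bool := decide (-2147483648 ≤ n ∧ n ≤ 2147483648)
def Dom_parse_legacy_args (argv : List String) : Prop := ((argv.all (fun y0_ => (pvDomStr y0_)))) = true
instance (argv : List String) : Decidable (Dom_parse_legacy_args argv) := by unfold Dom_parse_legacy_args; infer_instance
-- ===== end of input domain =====

-- B replaces A's nested while loops and index bookkeeping by a single enumerate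
-- pass that starts a new group at index 0 or at a build command (objective: simpler).

-- ===== PORT A =====
-- the for-loop with early return inside is_build_cmnd
def pvGoBuild (cmnd : String) : List String → Bool
  | [] => false
  | x :: xs => if x == cmnd then true else pvGoBuild cmnd xs

def is_build_cmnd (cmnd : String) : Bool := pvGoBuild cmnd ["buildsln", "run"]

-- inner 'while True' loop of A: consumes non-build successors, returns (cmds, i)
def pvInnerA (argv : List String) (i : Nat) (cmds : List String) : List String × Nat :=
  if h : i + 1 < argv.length ∧ ¬ is_build_cmnd (argv.getD (i + 1) "") then
    pvInnerA argv (i + 1) (cmds ++ [argv.getD (i + 1) ""])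
  else (cmds, i)
termination_by argv.length - i
decreasing_by omega

-- the inner loop never decreases i (needed for pvOuterA's termination)
theorem pvInnerA_ge (argv : List String) (i : Nat) (cmds : List String) :
    i ≤ (pvInnerA argv i cmds).2 := by
  fun_induction pvInnerA argv i cmds with
  | case1 i cmds h ih => omega
  | case2 i cmds h => simp

-- outer 'while i < argc' loop of A
def pvOuterA (argv : List String) (i : Nat) (cmd_list : List (List String)) :
    List (List String) :=
  if h : i < argv.length then
    let p := pvInnerA argv i [argv.getD i ""]
    pvOuterA argv (p.2 + 1) (cmd_list ++ [p.1])
  else cmd_list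
termination_by argv.length - i
decreasing_by have := pvInnerA_ge argv i [argv.getD i ""]; omega

def parse_legacy_args (argv : List String) : List (List String) :=
  pvOuterA argv 0 []

-- ===== PORT B =====
-- loop body of B: new group at idx 0 or at a build command, else extend last group
def pvStepB (result : List (List String)) (p : Int × String) : List (List String) :=
  if p.1 == 0 || (p.2 == "buildsln" || p.2 == "run") then
    result ++ [[p.2]]
  else
    result.dropLast ++ [(result.getLast?.getD []) ++ [p.2]]

def parse_legacy_args_alt (argv : List String) : List (List String) :=
  (PySem.List.enumerate argv).foldl pvStepB []

-- ===== PRECONDITION & SPEC =====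
def Spec_parse_legacy_args (argv : List String) (out : List (List String)) : Prop := out = parse_legacy_args_alt argv
instance (argv : List String) (out : List (List String)) : Decidable (Spec_parse_legacy_args argv out) := by unfold Spec_parse_legacy_args; infer_instance

-- ===== CLAIM (what is proved, stated in full; the proofs are below) =====
def Claim_equal_parse_legacy_args : Prop := ∀ (argv : List String), Dom_parse_legacy_args argv → Spec_parse_legacy_args argv (parse_legacy_args argv)

-- ===== LEMMAS AND PROOFS =====

-- "not a build command", the common scanning predicate
def pvNb (x : String) : Bool := !(x == "buildsln" || x == "run")

theorem is_build_eq (x : String) :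
    is_build_cmnd x = (x == "buildsln" || x == "run") := by
  by_cases h1 : x = "buildsln" <;> by_cases h2 : x = "run" <;>
    simp [is_build_cmnd, pvGoBuild, h1, h2, beq_iff_eq, Ne.symm]

-- canonical grouping: pvAux g ys = groups with g the currently open group
def pvAux (g : List String) : List String → List (List String)
  | [] => [g]
  | y :: ys => if pvNb y then pvAux (g ++ [y]) ys else g :: pvAux [y] ys

def pvGroups : List String → List (List String)
  | [] => []
  | y :: ys => pvAux [y] ys

theorem pvAux_spec (ys : List String) (g : List String) :
    pvAux g ys = (g ++ ys.takeWhile pvNb) :: pvGroups (ys.dropWhile pvNb) := by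
  induction ys generalizing g with
  | nil => simp [pvAux, pvGroups]
  | cons y ys ih =>
    by_cases h : pvNb y = true
    · simp [pvAux, h, ih (g ++ [y])]
    · simp only [Bool.not_eq_true] at h
      simp [pvAux, h, pvGroups]

-- ===== A-side: the two loops compute pvGroups =====

theorem pvGetD_eq (argv : List String) (i : Nat) (h : i < argv.length) :
    argv.getD i "" = argv[i] := by
  rw [List.getD_eq_getElem?_getD, List.getElem?_eq_getElem h, Option.getD_some]

theorem pvInnerA_spec (argv : List String) (i : Nat) (cmds : List String) :
    pvInnerA argv i cmds =
      (cmds ++ (argv.drop (i + 1)).takeWhile pvNb,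
       i + ((argv.drop (i + 1)).takeWhile pvNb).length) := by
  fun_induction pvInnerA argv i cmds with
  | case1 i cmds h ih =>
    obtain ⟨hlt, hnb⟩ := h
    have hd : argv.drop (i + 1) = argv[i + 1] :: argv.drop (i + 1 + 1) :=
      List.drop_eq_getElem_cons hlt
    have hget : argv.getD (i + 1) "" = argv[i + 1] := pvGetD_eq argv (i + 1) hlt
    rw [hget] at hnb ih
    have hnb' : pvNb argv[i + 1] = true := by
      simp only [pvNb, Bool.not_eq_eq_eq_not, Bool.not_true]
      rw [← is_build_eq]
      simpa using hnb
    rw [hget, ih, hd, List.takeWhile_cons, hnb']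
    refine Prod.ext ?_ ?_
    · simp
    · simp; omega
  | case2 i cmds h =>
    rcases Nat.lt_or_ge (i + 1) argv.length with hlt | hge
    · have hget : argv.getD (i + 1) "" = argv[i + 1] := pvGetD_eq argv (i + 1) hlt
      have hb : is_build_cmnd argv[i + 1] = true := by
        by_contra hc
        exact h ⟨hlt, by rw [hget]; simpa using hc⟩
      have hd : argv.drop (i + 1) = argv[i + 1] :: argv.drop (i + 1 + 1) :=
        List.drop_eq_getElem_cons hlt
      have hnb' : pvNb argv[i + 1] = false := by
        simp only [pvNb, ← is_build_eq]
        simpa using hb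
      rw [hd, List.takeWhile_cons, hnb']
      simp
    · have : argv.drop (i + 1) = [] := List.drop_eq_nil_of_le hge
      simp [this]

theorem pvDrop_length_takeWhile {α : Type} (p : α → Bool) (l : List α) :
    l.drop (l.takeWhile p).length = l.dropWhile p := by
  induction l with
  | nil => simp
  | cons y ys ih =>
    by_cases h : p y = true
    · simp [h, ih]
    · simp only [Bool.not_eq_true] at h
      simp [h]

theorem pvOuterA_spec (argv : List String) (i : Nat) (acc : List (List String)) :
    pvOuterA argv i acc = acc ++ pvGroups (argv.drop i) := by
  fun_induction pvOuterA argv i acc with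
  | case1 i acc h p ih =>
    have hget : argv.getD i "" = argv[i] := pvGetD_eq argv i h
    have hd : argv.drop i = argv[i] :: argv.drop (i + 1) := List.drop_eq_getElem_cons h
    have hp : p = ([argv[i]] ++ (argv.drop (i + 1)).takeWhile pvNb,
        i + ((argv.drop (i + 1)).takeWhile pvNb).length) := by
      rw [show p = pvInnerA argv i [argv.getD i ""] from rfl, hget, pvInnerA_spec]
    have hdrop : argv.drop (p.2 + 1) = (argv.drop (i + 1)).dropWhile pvNb := by
      rw [hp]
      have h2 : i + ((argv.drop (i + 1)).takeWhile pvNb).length + 1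
           = (i + 1) + ((argv.drop (i + 1)).takeWhile pvNb).length := by omega
      rw [h2, ← List.drop_drop, pvDrop_length_takeWhile]
    rw [ih, hdrop, hd, pvGroups, pvAux_spec, hp]
    simp
  | case2 i acc h =>
    have : argv.drop i = [] := List.drop_eq_nil_of_le (by omega)
    simp [this, pvGroups]

-- ===== B-side: the enumerate fold computes pvGroups =====

theorem pvFoldB_spec (ys : List String) (k : Int) (hk : 1 ≤ k)
    (rs : List (List String)) (g : List String) :
    (PySem.List.enumerate ys k).foldl pvStepB (rs ++ [g]) = rs ++ pvAux g ys := by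
  induction ys generalizing k rs g with
  | nil => simp [pvAux]
  | cons y ys ih =>
    rw [PySem.List.enumerate_cons, List.foldl_cons]
    by_cases h : pvNb y = true
    · have hb : (y == "buildsln" || y == "run") = false := by
        simpa [pvNb] using h
      have hk0 : (k == 0) = false := by simp; omega
      have : pvStepB (rs ++ [g]) (k, y) = rs ++ [g ++ [y]] := by
        simp [pvStepB, hk0, hb]
      rw [this, ih (k + 1) (by omega) rs (g ++ [y])]
      simp [pvAux, h]
    · simp only [Bool.not_eq_true] at h
      have hb : (y == "buildsln" || y == "run") = true := by
        cases hbv : (y == "buildsln" || y == "run") <;> simp [pvNb, hbv] at h ⊢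
      have : pvStepB (rs ++ [g]) (k, y) = (rs ++ [g]) ++ [[y]] := by
        simp [pvStepB, hb]
      rw [this, ih (k + 1) (by omega) (rs ++ [g]) [y]]
      simp [pvAux, h]

theorem parse_legacy_args_alt_eq (argv : List String) :
    parse_legacy_args_alt argv = pvGroups argv := by
  cases argv with
  | nil => simp [parse_legacy_args_alt, pvGroups]
  | cons x xs =>
    rw [parse_legacy_args_alt, PySem.List.enumerate_cons, List.foldl_cons]
    have : pvStepB [] (0, x) = [] ++ [[x]] := by simp [pvStepB]
    rw [this, pvFoldB_spec xs (0 + 1) (by omega) [] [x]]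
    simp [pvGroups]

-- ===== VERDICT (by name: the statement is the Claim_ definition above) =====
theorem parse_legacy_args_spec : Claim_equal_parse_legacy_args := by
  intro argv _
  unfold Spec_parse_legacy_args
  rw [parse_legacy_args_alt_eq, parse_legacy_args, pvOuterA_spec]
  simp
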